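-- pv_equiv track=rewrite | github.com/arielgg46/Thesis | src/grammar/pddl_bnf.py | filter_rules_by_requirements
-- ===== SOURCE A (Python) =====
-- def expand_requirements(enabled, expansions):
--     """
--     Recursively expand a set of requirements based on the expansion rules.
--     """
--     expanded = set(enabled)
--     changed = True
--
--     while changed:
--         changed = False
--         for req, implied in expansions.items():
--             if req in expanded and not all(r in expanded for r in implied):
--                 expanded.update(implied)
--                 changed = True
--
--     return expanded
--
-- def filter_rules_by_requirements(rules_with_reqs, enabled_requirements):
--     """
--     Filters rules by checking whether their (expanded) requirements are enabled.
--
--     Args: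
--         rules_with_reqs (list[tuple[str, list[str]]]):
--             List of (rule, requirements) pairs.
--         enabled_requirements (list[str]):
--             List of enabled requirements.
--
--     Returns:
--         str: Concatenated string of rules that pass the requirement filter.
--     """
--     REQUIREMENT_EXPANSIONS = {
--         ":adl": [
--             ":strips", ":typing", ":negative-preconditions", ":disjunctive-preconditions",
--             ":equality", ":existential-preconditions", ":universal-preconditions", ":conditional-effects"
--         ],
--         ":quantified-preconditions": [":existential-preconditions", ":universal-preconditions"],
--         ":fluents": [":numeric-fluents", ":object-fluents"],
--     }
--
--     expanded_enabled = expand_requirements(enabled_requirements, REQUIREMENT_EXPANSIONS)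
--
--     valid_rules = [
--         rule for rule, reqs in rules_with_reqs
--         if all(r in expanded_enabled for r in reqs)
--     ]
--
--     return "\n".join(valid_rules)
-- ===== SOURCE B (Python) =====
-- REQUIREMENT_EXPANSIONS = {
--     ":adl": [
--         ":strips", ":typing", ":negative-preconditions", ":disjunctive-preconditions",
--         ":equality", ":existential-preconditions", ":universal-preconditions", ":conditional-effects"
--     ],
--     ":quantified-preconditions": [":existential-preconditions", ":universal-preconditions"],
--     ":fluents": [":numeric-fluents", ":object-fluents"],
-- }
--
--
-- def filter_rules_by_requirements(rules_with_reqs, enabled_requirements):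
--     # Worklist closure of the enabled requirements under REQUIREMENT_EXPANSIONS.
--     expanded = set()
--     stack = []
--     for req in enabled_requirements:
--         if req not in expanded:
--             expanded.add(req)
--             stack.append(req)
--     while stack:
--         req = stack.pop()
--         implied = REQUIREMENT_EXPANSIONS.get(req)
--         if implied is not None:
--             for r in implied:
--                 if r not in expanded:
--                     expanded.add(r)
--                     stack.append(r)
--     return "\n".join(
--         rule for rule, reqs in rules_with_reqs
--         if all(r in expanded for r in reqs)
--     )
-- ===== Notes on version B (the rewrite author's own statement) =====
-- stated objective: alternative
-- what changed: A's expand_requirements repeatedly rescans the whole expansion table until a full pass changes nothing (a fixpoint loop); B computes the same closure with a single worklist/stack traversal that pops one requirement at a time and only pushes newly added implied requirements; the filter-and-join stage is unchanged.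
import Mathlib
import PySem

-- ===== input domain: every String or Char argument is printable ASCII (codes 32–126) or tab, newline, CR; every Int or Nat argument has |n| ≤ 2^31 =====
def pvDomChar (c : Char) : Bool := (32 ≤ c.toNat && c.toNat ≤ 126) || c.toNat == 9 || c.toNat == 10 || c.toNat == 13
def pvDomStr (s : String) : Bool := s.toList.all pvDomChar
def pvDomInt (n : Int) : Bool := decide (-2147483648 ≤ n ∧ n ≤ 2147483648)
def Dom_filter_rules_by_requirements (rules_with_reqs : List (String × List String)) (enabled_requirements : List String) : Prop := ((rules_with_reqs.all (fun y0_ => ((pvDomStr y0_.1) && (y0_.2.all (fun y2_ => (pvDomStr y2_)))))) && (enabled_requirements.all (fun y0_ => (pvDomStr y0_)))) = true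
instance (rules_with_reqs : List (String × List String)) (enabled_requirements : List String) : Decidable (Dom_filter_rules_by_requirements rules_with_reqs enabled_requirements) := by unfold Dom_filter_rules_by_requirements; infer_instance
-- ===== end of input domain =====

-- B replaces A's fixpoint full-rescan loop over the expansion table by a one-pass worklist (stack)
-- closure of the enabled requirements; the filter-and-join stage is shared by both sources (objective: alternative).

-- ===== PORT A =====
def pvAdl : List String := [":strips", ":typing", ":negative-preconditions", ":disjunctive-preconditions", ":equality", ":existential-preconditions", ":universal-preconditions", ":conditional-effects"]
def pvQp : List String := [":existential-preconditions", ":universal-preconditions"]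
def pvFl : List String := [":numeric-fluents", ":object-fluents"]
def pvExpansions : PySem.Dict String (List String) :=
  PySem.Dict.ofList [(":adl", pvAdl), (":quantified-preconditions", pvQp), (":fluents", pvFl)]

-- one item of A's "for req, implied in expansions.items()" body, state = (expanded, changed)
def pvPassStep (st : PySem.Set String × Bool) (p : String × List String) : PySem.Set String × Bool :=
  if PySem.Set.contains st.1 p.1 && !(p.2.all (fun r => PySem.Set.contains st.1 r)) then
    (PySem.Set.update st.1 p.2, true)
  else st

-- A's "while changed" loop; fuel is only a totality guard (proved sufficient for the dict A uses)
def pvExpandLoop (expansions : PySem.Dict String (List String)) : Nat → PySem.Set String → PySem.Set String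
  | 0, expanded => expanded
  | fuel+1, expanded =>
    let st := expansions.items.foldl pvPassStep (expanded, false)
    if st.2 then pvExpandLoop expansions fuel st.1 else st.1

def expand_requirements (enabled : List String) (expansions : PySem.Dict String (List String)) : PySem.Set String :=
  pvExpandLoop expansions (enabled.length + 2) (PySem.Set.ofList enabled)

def filter_rules_by_requirements (rules_with_reqs : List (String × List String)) (enabled_requirements : List String) : String :=
  let expanded := expand_requirements enabled_requirements pvExpansions
  PySem.Str.join "\n" ((rules_with_reqs.filter (fun p => p.2.all (fun r => PySem.Set.contains expanded r))).map (fun p => p.1))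

-- ===== PORT B =====
-- Source B's "if x not in expanded: expanded.add(x); stack.append(x)" (stack top = list head)
def pvPush (st : PySem.Set String × List String) (x : String) : PySem.Set String × List String :=
  if PySem.Set.contains st.1 x then st else (PySem.Set.add st.1 x, x :: st.2)

-- Source B's "while stack" worklist loop; fuel is only a totality guard (proved sufficient)
def pvWorklist : Nat → PySem.Set String → List String → PySem.Set String
  | 0, expanded, _ => expanded
  | _+1, expanded, [] => expanded
  | fuel+1, expanded, req :: stack =>
    match PySem.Dict.get? pvExpansions req with
    | none => pvWorklist fuel expanded stack
    | some implied =>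
      let st := implied.foldl pvPush (expanded, stack)
      pvWorklist fuel st.1 st.2

def filter_rules_by_requirements_alt (rules_with_reqs : List (String × List String)) (enabled_requirements : List String) : String :=
  let st := enabled_requirements.foldl pvPush (PySem.Set.empty, [])
  let expanded := pvWorklist (10 * enabled_requirements.length + 1) st.1 st.2
  PySem.Str.join "\n" ((rules_with_reqs.filter (fun p => p.2.all (fun r => PySem.Set.contains expanded r))).map (fun p => p.1))

-- ===== PRECONDITION & SPEC =====
def Spec_filter_rules_by_requirements (rules_with_reqs : List (String × List String)) (enabled_requirements : List String) (out : String) : Prop := out = filter_rules_by_requirements_alt rules_with_reqs enabled_requirements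
instance (rules_with_reqs : List (String × List String)) (enabled_requirements : List String) (out : String) : Decidable (Spec_filter_rules_by_requirements rules_with_reqs enabled_requirements out) := by unfold Spec_filter_rules_by_requirements; infer_instance

-- ===== CLAIM (what is proved, stated in full; the proofs are below) =====
def Claim_equal_filter_rules_by_requirements : Prop := ∀ (rules_with_reqs : List (String × List String)) (enabled_requirements : List String), Dom_filter_rules_by_requirements rules_with_reqs enabled_requirements → Spec_filter_rules_by_requirements rules_with_reqs enabled_requirements (filter_rules_by_requirements rules_with_reqs enabled_requirements)

-- ===== LEMMAS AND PROOFS =====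

-- membership in the requirement closure of the list e
def pvClosure (e : List String) (r : String) : Prop :=
  r ∈ e ∨ (":adl" ∈ e ∧ r ∈ pvAdl) ∨ (":quantified-preconditions" ∈ e ∧ r ∈ pvQp) ∨ (":fluents" ∈ e ∧ r ∈ pvFl)

theorem pvClosure_congr {e e' : List String} (h : ∀ x, x ∈ e ↔ x ∈ e') (r : String) :
    pvClosure e r ↔ pvClosure e' r := by
  unfold pvClosure; rw [h, h, h, h]

-- ——— A-side ———

theorem passStep_mem (st : PySem.Set String × Bool) (p : String × List String) (r : String) :
    r ∈ (pvPassStep st p).1 ↔ r ∈ st.1 ∨ (p.1 ∈ st.1 ∧ r ∈ p.2) := by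
  unfold pvPassStep
  split_ifs with h
  · simp only [Bool.and_eq_true, PySem.Set.contains_iff] at h
    simp only [PySem.Set.mem_update]
    exact ⟨fun hc => hc.elim Or.inl (fun hr => Or.inr ⟨h.1, hr⟩), fun hc => hc.elim Or.inl (fun hr => Or.inr hr.2)⟩
  · rw [Bool.and_eq_true, Bool.not_eq_true'] at h
    by_cases hk : p.1 ∈ st.1
    · have hall : (p.2.all fun r => PySem.Set.contains st.1 r) = true := by
        rcases Bool.eq_false_or_eq_true (p.2.all fun r => PySem.Set.contains st.1 r) with ht | hf
        · exact ht
        · exact absurd ⟨(PySem.Set.contains_iff _ _).mpr hk, hf⟩ h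
      rw [List.all_eq_true] at hall
      constructor
      · exact Or.inl
      · rintro (hr | ⟨-, hr⟩)
        · exact hr
        · exact (PySem.Set.contains_iff _ _).mp (hall r hr)
    · exact ⟨Or.inl, fun hc => hc.elim id (fun hc => absurd hc.1 hk)⟩

theorem passStep_noop (st : PySem.Set String × Bool) (p : String × List String)
    (h : p.1 ∈ st.1 → ∀ x ∈ p.2, x ∈ st.1) : pvPassStep st p = st := by
  unfold pvPassStep
  split_ifs with hc
  · exfalso
    rw [Bool.and_eq_true, Bool.not_eq_true'] at hc
    rcases hc with ⟨hk, hall⟩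
    have hk' : p.1 ∈ st.1 := (PySem.Set.contains_iff _ _).mp hk
    have hall' : (p.2.all fun r => PySem.Set.contains st.1 r) = true := by
      rw [List.all_eq_true]; intro x hx; exact (PySem.Set.contains_iff _ _).mpr (h hk' x hx)
    rw [hall'] at hall; exact Bool.noConfusion hall
  · rfl

theorem pass_mem (e : PySem.Set String) (r : String) :
    r ∈ (pvExpansions.items.foldl pvPassStep (e, false)).1 ↔ pvClosure e r := by
  have hitems : pvExpansions.items = [(":adl", pvAdl), (":quantified-preconditions", pvQp), (":fluents", pvFl)] := rfl
  rw [hitems]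
  simp only [List.foldl_cons, List.foldl_nil]
  set s1 := pvPassStep (e, false) (":adl", pvAdl) with hs1
  set s2 := pvPassStep s1 (":quantified-preconditions", pvQp) with hs2
  have h1 : ∀ x, x ∈ s1.1 ↔ x ∈ e ∨ (":adl" ∈ e ∧ x ∈ pvAdl) := fun x => passStep_mem (e, false) _ x
  have hqp1 : (":quantified-preconditions" : String) ∈ s1.1 ↔ ":quantified-preconditions" ∈ e := by
    rw [h1]; simp [pvAdl]
  have h2 : ∀ x, x ∈ s2.1 ↔ x ∈ e ∨ (":adl" ∈ e ∧ x ∈ pvAdl) ∨ (":quantified-preconditions" ∈ e ∧ x ∈ pvQp) := by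
    intro x
    rw [show s2 = pvPassStep s1 _ from hs2, passStep_mem, h1, hqp1]
    tauto
  have hfl2 : (":fluents" : String) ∈ s2.1 ↔ ":fluents" ∈ e := by
    rw [h2]; simp [pvAdl, pvQp]
  rw [passStep_mem, h2, hfl2]
  unfold pvClosure
  tauto

theorem pass_fix (e : PySem.Set String)
    (h : ∀ p ∈ pvExpansions.items, p.1 ∈ e → ∀ x ∈ p.2, x ∈ e) :
    pvExpansions.items.foldl pvPassStep (e, false) = (e, false) := by
  have hitems : pvExpansions.items = [(":adl", pvAdl), (":quantified-preconditions", pvQp), (":fluents", pvFl)] := rfl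
  rw [hitems]
  simp only [List.foldl_cons, List.foldl_nil]
  rw [passStep_noop (e, false) (":adl", pvAdl) (h (":adl", pvAdl) (by rw [hitems]; simp))]
  rw [passStep_noop (e, false) (":quantified-preconditions", pvQp) (h (":quantified-preconditions", pvQp) (by rw [hitems]; simp))]
  rw [passStep_noop (e, false) (":fluents", pvFl) (h (":fluents", pvFl) (by rw [hitems]; simp))]

theorem pass_result_fix (e : PySem.Set String) :
    ∀ p ∈ pvExpansions.items, p.1 ∈ (pvExpansions.items.foldl pvPassStep (e, false)).1 →
      ∀ x ∈ p.2, x ∈ (pvExpansions.items.foldl pvPassStep (e, false)).1 := by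
  intro p hp hk x hx
  have hitems : pvExpansions.items = [(":adl", pvAdl), (":quantified-preconditions", pvQp), (":fluents", pvFl)] := rfl
  rw [hitems] at hp
  rw [pass_mem] at hk ⊢
  simp only [List.mem_cons, List.not_mem_nil, or_false] at hp
  unfold pvClosure at hk ⊢
  rcases hp with h | h | h <;> subst h
  · simp only [show (":adl" : String) ∉ pvAdl by decide, show (":adl" : String) ∉ pvQp by decide,
      show (":adl" : String) ∉ pvFl by decide, and_false, or_false] at hk
    exact Or.inr (Or.inl ⟨hk, hx⟩)
  · simp only [show (":quantified-preconditions" : String) ∉ pvAdl by decide,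
      show (":quantified-preconditions" : String) ∉ pvQp by decide,
      show (":quantified-preconditions" : String) ∉ pvFl by decide, and_false, or_false] at hk
    exact Or.inr (Or.inr (Or.inl ⟨hk, hx⟩))
  · simp only [show (":fluents" : String) ∉ pvAdl by decide, show (":fluents" : String) ∉ pvQp by decide,
      show (":fluents" : String) ∉ pvFl by decide, and_false, or_false] at hk
    exact Or.inr (Or.inr (Or.inr ⟨hk, hx⟩))

theorem expandLoop_mem (n : Nat) (e : PySem.Set String) (r : String) :
    r ∈ pvExpandLoop pvExpansions (n + 2) e ↔ pvClosure e r := by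
  show r ∈ (let st := pvExpansions.items.foldl pvPassStep (e, false);
      if st.2 then pvExpandLoop pvExpansions (n + 1) st.1 else st.1) ↔ _
  simp only []
  split_ifs with hc
  · show r ∈ (let st2 := pvExpansions.items.foldl pvPassStep ((pvExpansions.items.foldl pvPassStep (e, false)).1, false);
        if st2.2 then pvExpandLoop pvExpansions n st2.1 else st2.1) ↔ _
    rw [show pvExpansions.items.foldl pvPassStep ((pvExpansions.items.foldl pvPassStep (e, false)).1, false)
        = ((pvExpansions.items.foldl pvPassStep (e, false)).1, false) from
      pass_fix _ (pass_result_fix e)]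
    simp only [if_neg (by simp : ¬ (false = true))]
    exact pass_mem e r
  · exact pass_mem e r

theorem expandA_mem (enabled : List String) (r : String) :
    r ∈ expand_requirements enabled pvExpansions ↔ pvClosure enabled r := by
  unfold expand_requirements
  rw [expandLoop_mem]
  exact pvClosure_congr (fun x => PySem.Set.mem_ofList _ _) r

-- ——— B-side ———

def pvIsKey (x : String) : Bool := x == ":adl" || x == ":quantified-preconditions" || x == ":fluents"

def pvImplied (x : String) : List String :=
  if x = ":adl" then pvAdl else if x = ":quantified-preconditions" then pvQp
  else if x = ":fluents" then pvFl else []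

def pvM (stack : List String) : Nat := stack.length + 9 * (stack.filter pvIsKey).length

theorem get?_pvExpansions (req : String) :
    PySem.Dict.get? pvExpansions req =
      if req = ":adl" then some pvAdl else if req = ":quantified-preconditions" then some pvQp
      else if req = ":fluents" then some pvFl else none := by
  split_ifs with h1 h2 h3
  · subst h1; rfl
  · subst h2; rfl
  · subst h3; rfl
  · show PySem.Dict.get? (PySem.Dict.mk [(":adl", pvAdl), (":quantified-preconditions", pvQp), (":fluents", pvFl)]) req = none
    rw [PySem.Dict.get?_mk_cons, PySem.Dict.get?_mk_cons, PySem.Dict.get?_mk_cons]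
    simp only [beq_iff_eq]
    rw [if_neg (fun h => h1 h.symm), if_neg (fun h => h2 h.symm), if_neg (fun h => h3 h.symm)]
    rfl

theorem pvPush_pos (s : PySem.Set String) (t : List String) (x : String) (h : x ∈ s) :
    pvPush (s, t) x = (s, t) := by
  unfold pvPush
  rw [if_pos (by simpa [PySem.Set.contains_iff] using h)]

theorem pvPush_neg (s : PySem.Set String) (t : List String) (x : String) (h : x ∉ s) :
    pvPush (s, t) x = (PySem.Set.add s x, x :: t) := by
  unfold pvPush
  rw [if_neg (by simpa [PySem.Set.contains_iff] using h)]

theorem pushFold_mem (l : List String) (s : PySem.Set String) (t : List String) (r : String) :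
    r ∈ (l.foldl pvPush (s, t)).1 ↔ r ∈ s ∨ r ∈ l := by
  induction l generalizing s t with
  | nil => simp
  | cons a l ih =>
    simp only [List.foldl_cons]
    by_cases h : a ∈ s
    · rw [pvPush_pos s t a h, ih]
      simp only [List.mem_cons]
      constructor
      · rintro (hr | hr); exacts [Or.inl hr, Or.inr (Or.inr hr)]
      · rintro (hr | hr | hr); exacts [Or.inl hr, Or.inl (hr ▸ h), Or.inr hr]
    · rw [pvPush_neg s t a h, ih]
      simp only [PySem.Set.mem_add, List.mem_cons]
      tauto

theorem pushFold_stack_sub (l : List String) (s : PySem.Set String) (t : List String) :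
    ∀ x ∈ t, x ∈ (l.foldl pvPush (s, t)).2 := by
  induction l generalizing s t with
  | nil => simp
  | cons a l ih =>
    intro x hx
    simp only [List.foldl_cons]
    by_cases h : a ∈ s
    · rw [pvPush_pos s t a h]; exact ih s t x hx
    · rw [pvPush_neg s t a h]; exact ih _ _ x (List.mem_cons_of_mem a hx)

theorem pushFold_stack_in_set (l : List String) (s : PySem.Set String) (t : List String)
    (h : ∀ x ∈ t, x ∈ s) : ∀ x ∈ (l.foldl pvPush (s, t)).2, x ∈ (l.foldl pvPush (s, t)).1 := by
  induction l generalizing s t with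
  | nil => exact h
  | cons a l ih =>
    simp only [List.foldl_cons]
    by_cases hc : a ∈ s
    · rw [pvPush_pos s t a hc]; exact ih s t h
    · rw [pvPush_neg s t a hc]
      refine ih _ _ ?_
      intro x hx
      rw [PySem.Set.mem_add]
      rcases List.mem_cons.mp hx with hx | hx
      · exact Or.inr hx
      · exact Or.inl (h x hx)

theorem pushFold_set_in_stack (l : List String) (s : PySem.Set String) (t : List String)
    (h : ∀ x ∈ s, x ∈ t) : ∀ x ∈ (l.foldl pvPush (s, t)).1, x ∈ (l.foldl pvPush (s, t)).2 := by
  induction l generalizing s t with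
  | nil => exact h
  | cons a l ih =>
    simp only [List.foldl_cons]
    by_cases hc : a ∈ s
    · rw [pvPush_pos s t a hc]; exact ih s t h
    · rw [pvPush_neg s t a hc]
      refine ih _ _ ?_
      intro x hx
      rw [PySem.Set.mem_add] at hx
      rcases hx with hx | hx
      · exact List.mem_cons_of_mem a (h x hx)
      · subst hx; exact List.mem_cons_self

theorem pushFold_len (l : List String) (s : PySem.Set String) (t : List String) :
    (l.foldl pvPush (s, t)).2.length ≤ t.length + l.length := by
  induction l generalizing s t with
  | nil => simp
  | cons a l ih =>
    simp only [List.foldl_cons, List.length_cons]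
    by_cases hc : a ∈ s
    · rw [pvPush_pos s t a hc]; exact le_trans (ih s t) (by omega)
    · rw [pvPush_neg s t a hc]; exact le_trans (ih _ _) (by simp; omega)

theorem pushFold_keycount (l : List String) (s : PySem.Set String) (t : List String)
    (h : ∀ x ∈ l, pvIsKey x = false) :
    ((l.foldl pvPush (s, t)).2.filter pvIsKey).length = (t.filter pvIsKey).length := by
  induction l generalizing s t with
  | nil => rfl
  | cons a l ih =>
    simp only [List.foldl_cons]
    by_cases hc : a ∈ s
    · rw [pvPush_pos s t a hc]; exact ih s t (fun x hx => h x (List.mem_cons_of_mem a hx))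
    · rw [pvPush_neg s t a hc, ih _ _ (fun x hx => h x (List.mem_cons_of_mem a hx))]
      rw [List.filter_cons, if_neg (by simp [h a List.mem_cons_self])]

theorem worklist_mem (fuel : Nat) (e : PySem.Set String) (stack : List String)
    (hfuel : pvM stack < fuel) (hstk : ∀ x ∈ stack, x ∈ e)
    (hproc : ∀ k, pvIsKey k = true → k ∈ e → k ∈ stack ∨ ∀ x ∈ pvImplied k, x ∈ e)
    (r : String) : r ∈ pvWorklist fuel e stack ↔ pvClosure e r := by
  induction fuel generalizing e stack with
  | zero => omega
  | succ fuel ih =>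
    match stack with
    | [] =>
      show r ∈ e ↔ _
      unfold pvClosure
      constructor
      · exact Or.inl
      · rintro (hr | ⟨hk, hr⟩ | ⟨hk, hr⟩ | ⟨hk, hr⟩)
        · exact hr
        · exact (hproc ":adl" (by decide) hk).elim (by simp) (fun h => h r (by simpa [pvImplied] using hr))
        · exact (hproc ":quantified-preconditions" (by decide) hk).elim (by simp) (fun h => h r (by simpa [pvImplied] using hr))
        · exact (hproc ":fluents" (by decide) hk).elim (by simp) (fun h => h r (by simpa [pvImplied] using hr))
    | req :: stack =>
      show r ∈ (match PySem.Dict.get? pvExpansions req with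
        | none => pvWorklist fuel e stack
        | some implied =>
          let st := implied.foldl pvPush (e, stack)
          pvWorklist fuel st.1 st.2) ↔ _
      rw [get?_pvExpansions]
      have key_step : ∀ limp : List String, pvImplied req = limp →
          limp.length ≤ 8 → (∀ x ∈ limp, pvIsKey x = false) → pvIsKey req = true →
          (r ∈ pvWorklist fuel (limp.foldl pvPush (e, stack)).1 (limp.foldl pvPush (e, stack)).2 ↔ pvClosure e r) := by
        intro limp himp hlen hnok hkey
        have hkeyine : req ∈ e := hstk req List.mem_cons_self
        have hmem := pushFold_mem limp e stack
        have hfuel' : pvM (limp.foldl pvPush (e, stack)).2 < fuel := by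
          have hMc : pvM (req :: stack) = stack.length + 1 + 9 * ((stack.filter pvIsKey).length + 1) := by
            unfold pvM
            rw [List.filter_cons, if_pos (by simp [hkey])]
            simp
          have h1 := pushFold_len limp e stack
          have h2 := pushFold_keycount limp e stack hnok
          unfold pvM
          rw [hMc] at hfuel
          omega
        rw [ih _ _ hfuel'
          (pushFold_stack_in_set limp e stack (fun x hx => hstk x (List.mem_cons_of_mem req hx)))
          ?_]
        · have hkeys : ∀ k, pvIsKey k = true → (k ∈ (limp.foldl pvPush (e, stack)).1 ↔ k ∈ e) := by
            intro k hk
            rw [hmem k]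
            exact ⟨fun h => h.elim id (fun h => absurd (hnok k h) (by simp [hk])), Or.inl⟩
          unfold pvClosure
          rw [hmem r, hkeys ":adl" (by decide), hkeys ":quantified-preconditions" (by decide),
            hkeys ":fluents" (by decide)]
          have hlimp : r ∈ limp → (":adl" ∈ e ∧ r ∈ pvAdl) ∨ (":quantified-preconditions" ∈ e ∧ r ∈ pvQp) ∨ (":fluents" ∈ e ∧ r ∈ pvFl) := by
            intro hr
            have hk3 : req = ":adl" ∨ req = ":quantified-preconditions" ∨ req = ":fluents" := by
              have hb := hkey; unfold pvIsKey at hb; simp only [Bool.or_eq_true, beq_iff_eq] at hb; tauto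
            rw [← himp] at hr
            rcases hk3 with h | h | h <;> subst h <;> simp only [pvImplied] at hr <;>
              simp only [reduceIte] at hr <;> tauto
          tauto
        · -- hproc for the new state
          intro k hk hke
          have hke' : k ∈ e := by
            rcases (hmem k).mp hke with h | h
            · exact h
            · exact absurd (hnok k h) (by simp [hk])
          rcases hproc k hk hke' with hins | hsub
          · rcases List.mem_cons.mp hins with hkk | hks
            · subst hkk
              right
              intro x hx
              rw [himp] at hx
              exact (hmem x).mpr (Or.inr hx)
            · exact Or.inl (pushFold_stack_sub limp e stack k hks)
          · exact Or.inr (fun x hx => (hmem x).mpr (Or.inl (hsub x hx)))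
      split_ifs with h1 h2 h3
      · exact key_step pvAdl (by subst h1; rfl) (by decide) (by decide) (by subst h1; rfl)
      · exact key_step pvQp (by subst h2; rfl) (by decide) (by decide) (by subst h2; rfl)
      · exact key_step pvFl (by subst h3; rfl) (by decide) (by decide) (by subst h3; rfl)
      · have hnk : pvIsKey req = false := by
          unfold pvIsKey
          simp [h1, h2, h3]
        have hfuel' : pvM stack < fuel := by
          unfold pvM at hfuel ⊢
          rw [List.filter_cons, if_neg (by simp [hnk])] at hfuel
          simp at hfuel
          omega
        rw [ih _ _ hfuel' (fun x hx => hstk x (List.mem_cons_of_mem req hx)) ?_]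
        intro k hk hke
        rcases hproc k hk hke with hins | hsub
        · rcases List.mem_cons.mp hins with hkk | hks
          · subst hkk; rw [hk] at hnk; exact absurd hnk (by simp)
          · exact Or.inl hks
        · exact Or.inr hsub

theorem expandB_mem (enabled : List String) (r : String) :
    r ∈ pvWorklist (10 * enabled.length + 1)
        (enabled.foldl pvPush (PySem.Set.empty, [])).1 (enabled.foldl pvPush (PySem.Set.empty, [])).2
      ↔ pvClosure enabled r := by
  have hmem : ∀ x, x ∈ (enabled.foldl pvPush (PySem.Set.empty, [])).1 ↔ x ∈ enabled := by
    intro x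
    rw [pushFold_mem]
    simp [PySem.Set.empty]
  have hlen := pushFold_len enabled PySem.Set.empty []
  rw [worklist_mem]
  · exact pvClosure_congr hmem r
  · unfold pvM
    have hkc : ((enabled.foldl pvPush (PySem.Set.empty, [])).2.filter pvIsKey).length
        ≤ (enabled.foldl pvPush (PySem.Set.empty, [])).2.length := List.length_filter_le _ _
    simp only [List.length_nil, Nat.zero_add] at hlen
    omega
  · exact pushFold_stack_in_set enabled PySem.Set.empty [] (by simp [PySem.Set.empty])
  · intro k hk hke
    exact Or.inl (pushFold_set_in_stack enabled PySem.Set.empty [] (by simp [PySem.Set.empty]) k hke)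

-- ===== VERDICT (by name: the statement is the Claim_ definition above) =====
theorem filter_rules_by_requirements_spec : Claim_equal_filter_rules_by_requirements := by
  intro rules enabled _
  unfold Spec_filter_rules_by_requirements filter_rules_by_requirements filter_rules_by_requirements_alt
  have hc : ∀ x, PySem.Set.contains (expand_requirements enabled pvExpansions) x
      = PySem.Set.contains (pvWorklist (10 * enabled.length + 1)
          (enabled.foldl pvPush (PySem.Set.empty, [])).1 (enabled.foldl pvPush (PySem.Set.empty, [])).2) x := by
    intro x
    rw [Bool.eq_iff_iff, PySem.Set.contains_iff, PySem.Set.contains_iff, expandA_mem, expandB_mem]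
  simp only [hc]
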